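-- pv_equiv track=rewrite | github.com/andres-ulloa-de-la-torre/Tekton | util/parsers.py | parse_formulae
-- ===== SOURCE A (Python) =====
-- def parse_formulae(string):
--
--     stripped = ''
--     coefficients = []
--     accelerators = []
--     operators = []
--
--
--     for idx, char in enumerate(string):
--
--         if char in ['0', '1', '2', '3', '4', '5', '6', '7', '8', '9']:
--
--             last_char = string[idx - 1]
--
--             if last_char == ')' and char.isdigit():
--
--                 accelerators.append(int(char))
--
--             elif last_char == '(' and char.isdigit():
--
--                 coefficients.append(int(char))
--
--
--         elif char.lower() in [ 'i', 'e' , 'f' , 's', 'n' , 't', ' ']: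
--
--             stripped += char
--
--         elif char.lower() in ['~', 'oo', '->', '|']:
--
--             operators.append(char)
--             stripped += char
--
--         elif char in ['(', ')']:
--
--             stripped += char
--
--         else:
--
--             raise ValueError(f'Invalid character: {char}')
--
--         last_char = char
--
--     if coefficients == []:
--
--         if len(operators) == 1:
--
--             coefficients = [1,1]
--
--         elif len(operators) == 2:
--
--             coefficients = [1,1,1]
--
--
--     return stripped, coefficients, operators, accelerators
-- ===== SOURCE B (Python) =====
-- def parse_formulae(string):
--     # multi-pass: validate, then collect each output component with its own pass
--     allowed = set('0123456789iefsntIEFSNT ~|()')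
--     for ch in string:
--         if ch not in allowed:
--             raise ValueError(f'Invalid character: {ch}')
--     stripped = ''.join(ch for ch in string if not ch.isdigit())
--     operators = [ch for ch in string if ch in '~|']
--     n = len(string)
--     coefficients = [int(string[i]) for i in range(n)
--                     if string[i].isdigit() and string[i - 1] == '(']
--     accelerators = [int(string[i]) for i in range(n)
--                     if string[i].isdigit() and string[i - 1] == ')']
--     if not coefficients:
--         if len(operators) == 1:
--             coefficients = [1, 1]
--         elif len(operators) == 2:
--             coefficients = [1, 1, 1]
--     return stripped, coefficients, operators, accelerators
-- ===== Notes on version B (the rewrite author's own statement) =====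
-- stated objective: simpler
-- what changed: Replaces the single interleaved enumerate-loop carrying four accumulators with separate declarative passes: a validation scan, a filter for the stripped string, a filter for operators, and two indexed comprehensions (prev = string[i-1], with the same negative-index wraparound at i=0) for coefficients and accelerators.
import Mathlib
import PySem

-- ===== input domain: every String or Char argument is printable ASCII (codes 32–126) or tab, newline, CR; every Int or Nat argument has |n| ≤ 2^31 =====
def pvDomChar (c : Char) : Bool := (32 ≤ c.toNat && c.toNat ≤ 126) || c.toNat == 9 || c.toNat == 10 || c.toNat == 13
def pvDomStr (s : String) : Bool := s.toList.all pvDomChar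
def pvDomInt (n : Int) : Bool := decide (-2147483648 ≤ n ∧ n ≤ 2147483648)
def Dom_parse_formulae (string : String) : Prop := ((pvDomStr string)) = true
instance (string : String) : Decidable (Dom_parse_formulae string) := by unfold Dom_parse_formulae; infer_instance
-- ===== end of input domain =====

-- B re-decomposes A's single interleaved loop into separate passes (filters and indexed
-- comprehensions); equivalence is proved on all inputs with no invalid character (A raises there).

-- shared character helpers (exact on the ASCII domain both Pythons run on)
-- Python's char.isdigit() on ASCII, and membership in A's digit list, are both this test
def isDig (c : Char) : Bool := decide (c ∈ ['0','1','2','3','4','5','6','7','8','9'])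

-- Python's str.lower() on a single ASCII character
def pyCharLower (c : Char) : Char :=
  if 65 ≤ c.toNat ∧ c.toNat ≤ 90 then Char.ofNat (c.toNat + 32) else c

-- int(char) for an ASCII digit character
def intOf (c : Char) : Int := (c.toNat : Int) - 48

-- ===== PORT A =====
-- loop body of A's 'for idx, char in enumerate(string)'; state = (stripped, coefficients, operators, accelerators).
-- string[idx-1] is always in range inside the loop (the string is nonempty, -1 ≤ idx-1 < len), so pyGetD's
-- default is unreachable; the 'raise ValueError' branch (invalid char) is excluded by Pre_ and leaves the state.
def stepA (l : List Char) (s : List Char × List Int × List String × List Int)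
    (p : Int × Char) : List Char × List Int × List String × List Int :=
  let (st, co, op, ac) := s
  let (idx, c) := p
  if isDig c then
    let last := PySem.List.pyGetD l (idx - 1) ' '
    if last = ')' ∧ isDig c then (st, co, op, ac ++ [intOf c])
    else if last = '(' ∧ isDig c then (st, co ++ [intOf c], op, ac)
    else (st, co, op, ac)
  else if pyCharLower c ∈ ['i', 'e', 'f', 's', 'n', 't', ' '] then
    (st ++ [c], co, op, ac)
  -- 'oo' and '->' from A's list can never equal a 1-character string, so only '~','|' remain
  else if pyCharLower c ∈ ['~', '|'] then
    (st ++ [c], co, op ++ [String.ofList [c]], ac)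
  else if c ∈ ['(', ')'] then
    (st ++ [c], co, op, ac)
  else -- raise ValueError (excluded by Pre_)
    (st, co, op, ac)

def parse_formulae (string : String) : String × List Int × List String × List Int :=
  let l := string.toList
  let r := (PySem.List.enumerate l 0).foldl (stepA l) ([], [], [], [])
  let st := r.1; let co := r.2.1; let op := r.2.2.1; let ac := r.2.2.2
  let co' := if co = [] then
      (if op.length = 1 then ([1, 1] : List Int)
       else if op.length = 2 then [1, 1, 1] else co)
    else co
  (String.ofList st, co', op, ac)

-- ===== PORT B =====
-- Source B's validation pass only raises (on inputs excluded by Pre_), producing nothing; the remaining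
-- passes are ported one for one. string[i]/string[i-1] are always in range (i ∈ range(n), wraparound at 0),
-- so pyGetD's default is unreachable.
def parse_formulae_alt (string : String) : String × List Int × List String × List Int :=
  let l := string.toList
  let stripped := String.ofList (l.filter (fun c => !isDig c))
  let operators := (l.filter (fun c => decide (c ∈ ['~', '|']))).map (fun c => String.ofList [c])
  let n : Int := (l.length : Int)
  let coefficients := (PySem.List.pyRange 0 n 1).filterMap (fun i =>
      if isDig (PySem.List.pyGetD l i ' ') ∧ PySem.List.pyGetD l (i - 1) ' ' = '('
      then some (intOf (PySem.List.pyGetD l i ' ')) else none)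
  let accelerators := (PySem.List.pyRange 0 n 1).filterMap (fun i =>
      if isDig (PySem.List.pyGetD l i ' ') ∧ PySem.List.pyGetD l (i - 1) ' ' = ')'
      then some (intOf (PySem.List.pyGetD l i ' ')) else none)
  let coefficients' := if coefficients = [] then
      (if operators.length = 1 then ([1, 1] : List Int)
       else if operators.length = 2 then [1, 1, 1] else coefficients)
    else coefficients
  (stripped, coefficients', operators, accelerators)

-- ===== PRECONDITION & SPEC =====
-- Pre_ excludes exactly the strings containing a character outside A's accepted alphabet:
-- A raises ValueError there (and B raises the same ValueError).
def validChar (c : Char) : Bool :=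
  isDig c || decide (pyCharLower c ∈ ['i', 'e', 'f', 's', 'n', 't', ' ']) ||
    decide (c ∈ ['~', '|', '(', ')'])

def Pre_parse_formulae (string : String) : Prop :=
  string.toList.all validChar = true

instance (string : String) : Decidable (Pre_parse_formulae string) := by
  unfold Pre_parse_formulae; infer_instance

def pvWitness_parse_formulae : String := "(2if)3 ~ (se)"

def Spec_parse_formulae (string : String) (out : String × List Int × List String × List Int) : Prop := out = parse_formulae_alt string
instance (string : String) (out : String × List Int × List String × List Int) : Decidable (Spec_parse_formulae string out) := by unfold Spec_parse_formulae; infer_instance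

-- ===== CLAIM (what is proved, stated in full; the proofs are below) =====
def Claim_equal_parse_formulae : Prop := ∀ (string : String), Dom_parse_formulae string → Pre_parse_formulae string → Spec_parse_formulae string (parse_formulae string)

-- ===== LEMMAS AND PROOFS =====

-- per-character outputs of A's loop, one per accumulator
def outS (c : Char) : Option Char :=
  if isDig c then none
  else if pyCharLower c ∈ ['i', 'e', 'f', 's', 'n', 't', ' '] then some c
  else if pyCharLower c ∈ ['~', '|'] then some c
  else if c ∈ ['(', ')'] then some c
  else none

def outO (c : Char) : Option String :=
  if isDig c then none
  else if pyCharLower c ∈ ['i', 'e', 'f', 's', 'n', 't', ' '] then none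
  else if pyCharLower c ∈ ['~', '|'] then some (String.ofList [c])
  else none

def outC (l : List Char) (p : Int × Char) : Option Int :=
  if isDig p.2 then
    if PySem.List.pyGetD l (p.1 - 1) ' ' = ')' ∧ isDig p.2 then none
    else if PySem.List.pyGetD l (p.1 - 1) ' ' = '(' ∧ isDig p.2 then some (intOf p.2)
    else none
  else none

def outAc (l : List Char) (p : Int × Char) : Option Int :=
  if isDig p.2 then
    if PySem.List.pyGetD l (p.1 - 1) ' ' = ')' ∧ isDig p.2 then some (intOf p.2)
    else none
  else none

theorem stepA_eq (l : List Char) (st : List Char) (co : List Int) (op : List String)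
    (ac : List Int) (idx : Int) (c : Char) :
    stepA l (st, co, op, ac) (idx, c) =
      (st ++ (outS c).toList, co ++ (outC l (idx, c)).toList,
       op ++ (outO c).toList, ac ++ (outAc l (idx, c)).toList) := by
  simp only [stepA, outS, outC, outO, outAc]
  split_ifs <;> simp

theorem foldA (l : List Char) (pairs : List (Int × Char))
    (st : List Char) (co : List Int) (op : List String) (ac : List Int) :
    pairs.foldl (stepA l) (st, co, op, ac) =
      (st ++ pairs.filterMap (fun p => outS p.2), co ++ pairs.filterMap (outC l),
       op ++ pairs.filterMap (fun p => outO p.2), ac ++ pairs.filterMap (outAc l)) := by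
  induction pairs generalizing st co op ac with
  | nil => simp
  | cons p rest ih =>
    obtain ⟨idx, c⟩ := p
    rw [List.foldl_cons, stepA_eq, ih, List.filterMap_cons, List.filterMap_cons,
      List.filterMap_cons, List.filterMap_cons]
    cases h1 : outS c <;> cases h2 : outC l (idx, c) <;>
      cases h3 : outO c <;> cases h4 : outAc l (idx, c) <;>
      simp

theorem outS_valid (c : Char) (h : validChar c = true) :
    outS c = if isDig c then none else some c := by
  simp only [validChar, Bool.or_eq_true, decide_eq_true_eq] at h
  rcases h with (h | h) | h
  · simp [outS, h]
  · unfold outS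
    by_cases hd : isDig c = true <;> simp [hd, h]
  · simp only [List.mem_cons, List.not_mem_nil, or_false] at h
    rcases h with h | h | h | h <;> (subst h; decide)

theorem outO_char (c : Char) :
    outO c = if c ∈ ['~', '|'] then some (String.ofList [c]) else none := by
  by_cases hA : 65 ≤ c.toNat ∧ c.toNat ≤ 90
  · -- uppercase letter: its lowercase has code c+32 ∈ [97,122], never '~' (126) or '|' (124)
    have hv : (c.toNat + 32).isValidChar := by left; omega
    have hlow : (pyCharLower c).toNat = c.toNat + 32 := by
      simp [pyCharLower, hA, Char.ofNat, hv]
    have hnd : isDig c = false := by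
      unfold isDig
      simp only [decide_eq_false_iff_not, List.mem_cons, List.not_mem_nil, or_false]
      rintro (h | h | h | h | h | h | h | h | h | h) <;>
        (subst h; exact absurd hA (by decide))
    have h126 : ('~').toNat = 126 := by decide
    have h124 : ('|').toNat = 124 := by decide
    have hops : pyCharLower c ∉ (['~', '|'] : List Char) := by
      simp only [List.mem_cons, List.not_mem_nil, or_false]
      rintro (h | h) <;>
      · have h2 := congrArg Char.toNat h
        rw [hlow] at h2
        omega
    have hcops : c ∉ (['~', '|'] : List Char) := by
      simp only [List.mem_cons, List.not_mem_nil, or_false]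
      rintro (h | h) <;> (subst h; exact absurd hA (by decide))
    by_cases hlet : pyCharLower c ∈ (['i', 'e', 'f', 's', 'n', 't', ' '] : List Char) <;>
      simp [outO, hnd, hops, hcops, hlet]
  · have hp : pyCharLower c = c := by simp [pyCharLower, hA]
    by_cases hops : c ∈ (['~', '|'] : List Char)
    · have hc : c = '~' ∨ c = '|' := by simpa using hops
      rcases hc with h | h <;> (subst h; decide)
    · by_cases hd : isDig c = true
      · simp [outO, hd, hops]
      · by_cases hlet : pyCharLower c ∈ (['i', 'e', 'f', 's', 'n', 't', ' '] : List Char)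
        · simp [outO, hd, hlet, hops]
        · simp [outO, hd, hp, hops]

theorem stripped_eq (l : List Char) (h : ∀ c ∈ l, validChar c = true) :
    l.filterMap outS = l.filter (fun c => !isDig c) := by
  induction l with
  | nil => simp
  | cons c rest ih =>
    have hc := h c (by simp)
    have ih' := ih (fun x hx => h x (by simp [hx]))
    rw [List.filterMap_cons, List.filter_cons, outS_valid c hc]
    by_cases hd : isDig c = true <;> simp [hd, ih']

theorem ops_eq (l : List Char) :
    l.filterMap outO =
      (l.filter (fun c => decide (c ∈ ['~', '|']))).map (fun c => String.ofList [c]) := by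
  induction l with
  | nil => simp
  | cons c rest ih =>
    rw [List.filterMap_cons, List.filter_cons, outO_char c]
    by_cases hm : c ∈ (['~', '|'] : List Char) <;> simp [hm, ih]

theorem snd_filterMap {α : Type} (l : List Char) (s : Int) (f : Char → Option α) :
    (PySem.List.enumerate l s).filterMap (fun p => f p.2) = l.filterMap f := by
  induction l generalizing s with
  | nil => simp [PySem.List.enumerate_nil]
  | cons c rest ih => rw [PySem.List.enumerate_cons, List.filterMap_cons,
      List.filterMap_cons, ih]

theorem coeff_eq (l : List Char) :
    (PySem.List.enumerate l 0).filterMap (outC l) =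
      (PySem.List.pyRange 0 (l.length : Int) 1).filterMap (fun i =>
        if isDig (PySem.List.pyGetD l i ' ') ∧ PySem.List.pyGetD l (i - 1) ' ' = '('
        then some (intOf (PySem.List.pyGetD l i ' ')) else none) := by
  rw [PySem.List.enumerate_eq_map_pyRange (d := ' '), List.filterMap_map,
    PySem.List.len_eq]
  apply List.filterMap_congr
  intro i _
  simp only [Function.comp_apply, outC]
  by_cases hd : isDig (PySem.List.pyGetD l i ' ') = true
  · by_cases hp : PySem.List.pyGetD l (i - 1) ' ' = ')'
    · simp [hd, hp]
    · by_cases hq : PySem.List.pyGetD l (i - 1) ' ' = '(' <;> simp [hd, hp, hq]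
  · simp [hd]

theorem accel_eq (l : List Char) :
    (PySem.List.enumerate l 0).filterMap (outAc l) =
      (PySem.List.pyRange 0 (l.length : Int) 1).filterMap (fun i =>
        if isDig (PySem.List.pyGetD l i ' ') ∧ PySem.List.pyGetD l (i - 1) ' ' = ')'
        then some (intOf (PySem.List.pyGetD l i ' ')) else none) := by
  rw [PySem.List.enumerate_eq_map_pyRange (d := ' '), List.filterMap_map,
    PySem.List.len_eq]
  apply List.filterMap_congr
  intro i _
  simp only [Function.comp_apply, outAc]
  by_cases hd : isDig (PySem.List.pyGetD l i ' ') = true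
  · by_cases hp : PySem.List.pyGetD l (i - 1) ' ' = ')' <;> simp [hd, hp]
  · simp [hd]

-- ===== VERDICT (by name: the statement is the Claim_ definition above) =====
theorem parse_formulae_spec : Claim_equal_parse_formulae := by
  intro string _hdom hpre
  unfold Spec_parse_formulae
  simp only [parse_formulae, parse_formulae_alt]
  rw [foldA]
  simp only [List.nil_append]
  rw [snd_filterMap string.toList 0 outS, snd_filterMap string.toList 0 outO,
      stripped_eq string.toList (by unfold Pre_parse_formulae at hpre; simpa [List.all_eq_true] using hpre), ops_eq string.toList,
      coeff_eq string.toList, accel_eq string.toList]
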